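-- pv_equiv track=rewrite | github.com/Hanan-KH8/finance-advisor-app | app.py | get_reference_cost
-- ===== SOURCE A (Python) =====
-- def get_reference_cost(ages):
--     total = 0
--
--     for age in ages:
--         if age < 6:
--             total += 3000
--         elif age < 18:
--             total += 4000
--         else:
--             total += 5000
--
--     return total
-- ===== SOURCE B (Python) =====
-- def get_reference_cost(ages):
--     child = sum(1 for a in ages if a < 6)
--     teen = sum(1 for a in ages if 6 <= a < 18)
--     adult = len(ages) - child - teen
--     return 3000 * child + 4000 * teen + 5000 * adult
-- ===== Notes on version B (the rewrite author's own statement) =====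
-- stated objective: alternative
-- what changed: B counts the number of ages in each tier (child/teen/adult) and returns the closed-form weighted sum 3000*child+4000*teen+5000*adult, instead of A's single accumulating loop with per-element branching.
import Mathlib
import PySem

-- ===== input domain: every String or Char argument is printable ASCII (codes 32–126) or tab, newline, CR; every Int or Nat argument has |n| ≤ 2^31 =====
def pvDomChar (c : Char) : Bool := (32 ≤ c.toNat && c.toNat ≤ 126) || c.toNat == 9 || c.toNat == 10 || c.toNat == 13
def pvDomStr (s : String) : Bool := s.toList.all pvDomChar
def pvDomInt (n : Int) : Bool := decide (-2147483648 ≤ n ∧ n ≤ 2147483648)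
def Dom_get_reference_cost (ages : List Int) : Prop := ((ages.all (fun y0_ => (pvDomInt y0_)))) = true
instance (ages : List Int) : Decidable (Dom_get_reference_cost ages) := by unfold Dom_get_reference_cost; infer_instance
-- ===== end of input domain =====

-- B replaces A's accumulating loop by per-tier counts combined in a closed-form weighted sum (alternative decomposition, same cost).
-- ===== PORT A =====
def get_reference_cost (ages : List Int) : Int :=
  ages.foldl (fun total age =>
    if age < 6 then total + 3000
    else if age < 18 then total + 4000
    else total + 5000) 0

-- ===== PORT B =====
def get_reference_cost_alt (ages : List Int) : Int :=
  let child : Int := (ages.countP (fun a => a < 6) : Nat)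
  let teen : Int := (ages.countP (fun a => 6 ≤ a ∧ a < 18) : Nat)
  let adult : Int := (ages.length : Int) - child - teen
  3000 * child + 4000 * teen + 5000 * adult

-- ===== PRECONDITION & SPEC =====
def Spec_get_reference_cost (ages : List Int) (out : Int) : Prop := out = get_reference_cost_alt ages
instance (ages : List Int) (out : Int) : Decidable (Spec_get_reference_cost ages out) := by unfold Spec_get_reference_cost; infer_instance

-- ===== CLAIM (what is proved, stated in full; the proofs are below) =====
def Claim_equal_get_reference_cost : Prop := ∀ (ages : List Int), Dom_get_reference_cost ages → Spec_get_reference_cost ages (get_reference_cost ages)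

-- ===== LEMMAS AND PROOFS =====

-- ===== VERDICT (by name: the statement is the Claim_ definition above) =====
theorem foldl_tiers (ages : List Int) (t : Int) :
    ages.foldl (fun total age =>
      if age < 6 then total + 3000
      else if age < 18 then total + 4000
      else total + 5000) t
    = t + 3000 * ((ages.countP (fun a => a < 6) : Nat) : Int)
        + 4000 * ((ages.countP (fun a => 6 ≤ a ∧ a < 18) : Nat) : Int)
        + 5000 * ((ages.length : Int)
            - ((ages.countP (fun a => a < 6) : Nat) : Int)
            - ((ages.countP (fun a => 6 ≤ a ∧ a < 18) : Nat) : Int)) := by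
  induction ages generalizing t with
  | nil => simp
  | cons a rest ih =>
    simp only [List.foldl_cons, List.countP_cons, List.length_cons, ih]
    by_cases h1 : a < 6
    · simp [h1, show ¬(6 ≤ a ∧ a < 18) by omega]
      ring
    · by_cases h2 : a < 18
      · simp [h1, h2, show (6 ≤ a ∧ a < 18) by omega]
        ring
      · simp [h1, h2]
        ring

theorem get_reference_cost_spec : Claim_equal_get_reference_cost := by
  intro ages _
  unfold Spec_get_reference_cost get_reference_cost get_reference_cost_alt
  rw [foldl_tiers]
  ring
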